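-- pv_equiv track=rewrite | github.com/ai-dragonfly/mcp-local-server | src/tools/_minecraft_control/operations/list_entities/parse.py | _balanced_block
-- ===== SOURCE A (Python) =====
-- from typing import Any, Dict, List, Optional, Tuple
--
-- def _balanced_block(s: str, i: int, open_ch: str, close_ch: str) -> Tuple[Optional[str], int]:
--     n = len(s)
--     if i >= n or s[i] != open_ch:
--         return None, i
--     depth = 1
--     j = i + 1
--     in_str = False
--     str_q: Optional[str] = None
--     esc = False
--     while j < n and depth > 0:
--         ch = s[j]
--         if in_str:
--             if esc:
--                 esc = False
--             elif ch == '\\':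
--                 esc = True
--             elif ch == str_q:
--                 in_str = False
--         else:
--             if ch in ('"', "'"):
--                 in_str = True
--                 str_q = ch
--             elif ch == open_ch:
--                 depth += 1
--             elif ch == close_ch:
--                 depth -= 1
--         j += 1
--     if depth == 0:
--         return s[i:j], j
--     return None, i
-- ===== SOURCE B (Python) =====
-- from typing import Optional, Tuple
--
--
-- def _skip_string(s: str, j: int, quote: str) -> Optional[int]:
--     # scan inside a string literal opened with `quote`; return index just past its close
--     n = len(s)
--     while j < n:
--         ch = s[j]
--         if ch == '\\':
--             j += 2
--         elif ch == quote:
--             return j + 1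
--         else:
--             j += 1
--     return None
--
--
-- def _scan(s: str, j: int, open_ch: str, close_ch: str) -> Optional[int]:
--     # scan from j for the close_ch matching an already-consumed open_ch;
--     # recursion (not a depth counter) consumes nested blocks
--     n = len(s)
--     while j < n:
--         ch = s[j]
--         if ch in ('"', "'"):
--             j = _skip_string(s, j + 1, ch)
--             if j is None:
--                 return None
--         elif ch == open_ch:
--             j = _scan(s, j + 1, open_ch, close_ch)
--             if j is None:
--                 return None
--         elif ch == close_ch:
--             return j + 1
--         else:
--             j += 1
--     return None
--
--
-- def _balanced_block(s: str, i: int, open_ch: str, close_ch: str) -> Tuple[Optional[str], int]: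
--     if i >= len(s) or s[i] != open_ch:
--         return None, i
--     end = _scan(s, i + 1, open_ch, close_ch)
--     if end is None:
--         return None, i
--     return s[i:end], end
-- ===== Notes on version B (the rewrite author's own statement) =====
-- stated objective: alternative
-- what changed: Replaced A's single while-loop that threads a depth counter plus in_str/str_q/esc flags by a recursive-descent matcher: a scanner that recurses on each nested open bracket (the call stack replaces the depth counter) and a separate string-literal skipper that consumes escapes by jumping two characters.
import Mathlib
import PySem

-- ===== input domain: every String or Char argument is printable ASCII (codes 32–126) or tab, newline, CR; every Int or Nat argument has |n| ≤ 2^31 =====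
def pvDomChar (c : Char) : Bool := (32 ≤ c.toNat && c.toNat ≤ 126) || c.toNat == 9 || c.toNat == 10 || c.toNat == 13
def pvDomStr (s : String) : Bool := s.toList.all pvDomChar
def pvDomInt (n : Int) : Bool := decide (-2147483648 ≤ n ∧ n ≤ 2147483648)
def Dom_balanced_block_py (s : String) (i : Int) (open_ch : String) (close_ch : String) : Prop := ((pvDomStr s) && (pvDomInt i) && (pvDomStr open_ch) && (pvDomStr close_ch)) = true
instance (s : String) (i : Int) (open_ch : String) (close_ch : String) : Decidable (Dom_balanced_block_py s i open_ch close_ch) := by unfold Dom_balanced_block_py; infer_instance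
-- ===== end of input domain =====

-- B replaces A's single while-loop with a depth counter and global string/escape flags by a
-- recursive matcher: a scanner that recurses on each nested open bracket (the call stack replaces
-- the depth counter) and a separate string-literal skipper (objective: alternative decomposition).

-- ===== PORT A =====
-- A's while loop: state (j, depth, in_str, str_q, esc); fuel = (n - j).toNat (j increases by 1 each
-- iteration, so the fuel is exactly the number of remaining iterations before j reaches n).
def pvALoop (cs : List Char) (n : Int) (open_ch close_ch : String) :
    Nat → Int → Int → Bool → Option String → Bool → Int × Int
  | 0, j, depth, _, _, _ => (j, depth)
  | fuel+1, j, depth, in_str, str_q, esc =>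
    if j < n ∧ 0 < depth then
      match PySem.List.pyGet? cs j with
      | none => (j, depth)  -- unreachable: i+1 ≤ j < n and -n ≤ i under Pre_
      | some c0 =>
        let ch := String.ofList [c0]
        if in_str then
          if esc then pvALoop cs n open_ch close_ch fuel (j+1) depth in_str str_q false
          else if ch = "\\" then pvALoop cs n open_ch close_ch fuel (j+1) depth in_str str_q true
          else if some ch = str_q then pvALoop cs n open_ch close_ch fuel (j+1) depth false str_q esc
          else pvALoop cs n open_ch close_ch fuel (j+1) depth in_str str_q esc
        else
          if ch = "\"" ∨ ch = "'" then pvALoop cs n open_ch close_ch fuel (j+1) depth true (some ch) esc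
          else if ch = open_ch then pvALoop cs n open_ch close_ch fuel (j+1) (depth+1) in_str str_q esc
          else if ch = close_ch then pvALoop cs n open_ch close_ch fuel (j+1) (depth-1) in_str str_q esc
          else pvALoop cs n open_ch close_ch fuel (j+1) depth in_str str_q esc
    else (j, depth)

def balanced_block_py (s : String) (i : Int) (open_ch : String) (close_ch : String) : Option String × Int :=
  let cs := s.toList
  let n : Int := (cs.length : Int)
  if n ≤ i then (none, i)
  else
    match PySem.List.pyGet? cs i with
    | none => (none, i)  -- Python raises IndexError here (i < -n); excluded by Pre_
    | some c0 =>
      if String.ofList [c0] ≠ open_ch then (none, i)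
      else
        let r := pvALoop cs n open_ch close_ch (n - (i+1)).toNat (i+1) 1 false none false
        if r.2 = 0 then (some (String.ofList (PySem.List.slice cs (some i) (some r.1))), r.1)
        else (none, i)

-- ===== PORT B =====
-- B's _skip_string: scan past a string literal opened with `quote`; '\\' skips two characters.
def pvBSkip (cs : List Char) (n : Int) (quote : String) : Nat → Int → Option Int
  | 0, _ => none
  | fuel+1, j =>
    if j < n then
      match PySem.List.pyGet? cs j with
      | none => none  -- unreachable under Pre_
      | some c0 =>
        let ch := String.ofList [c0]
        if ch = "\\" then pvBSkip cs n quote fuel (j+2)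
        else if ch = quote then some (j+1)
        else pvBSkip cs n quote fuel (j+1)
    else none

-- B's _scan: find the close matching an already-consumed open; recursion consumes nested blocks.
def pvBScan (cs : List Char) (n : Int) (open_ch close_ch : String) : Nat → Int → Option Int
  | 0, _ => none
  | fuel+1, j =>
    if j < n then
      match PySem.List.pyGet? cs j with
      | none => none  -- unreachable under Pre_
      | some c0 =>
        let ch := String.ofList [c0]
        if ch = "\"" ∨ ch = "'" then
          match pvBSkip cs n ch fuel (j+1) with
          | none => none
          | some j' => pvBScan cs n open_ch close_ch fuel j'
        else if ch = open_ch then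
          match pvBScan cs n open_ch close_ch fuel (j+1) with
          | none => none
          | some j' => pvBScan cs n open_ch close_ch fuel j'
        else if ch = close_ch then some (j+1)
        else pvBScan cs n open_ch close_ch fuel (j+1)
    else none

def balanced_block_py_alt (s : String) (i : Int) (open_ch : String) (close_ch : String) : Option String × Int :=
  let cs := s.toList
  let n : Int := (cs.length : Int)
  if n ≤ i then (none, i)
  else
    match PySem.List.pyGet? cs i with
    | none => (none, i)  -- Python raises IndexError here (i < -n); excluded by Pre_
    | some c0 =>
      if String.ofList [c0] ≠ open_ch then (none, i)
      else
        match pvBScan cs n open_ch close_ch (n - (i+1)).toNat (i+1) with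
        | none => (none, i)
        | some e => (some (String.ofList (PySem.List.slice cs (some i) (some e))), e)

-- ===== PRECONDITION & SPEC =====
-- Pre_ excludes exactly the inputs where Python's s[i] raises IndexError (i < -len(s) while i < len(s)).
def Pre_balanced_block_py (s : String) (i : Int) (open_ch : String) (close_ch : String) : Prop :=
  -(s.toList.length : Int) ≤ i ∨ (s.toList.length : Int) ≤ i
instance (s : String) (i : Int) (open_ch : String) (close_ch : String) : Decidable (Pre_balanced_block_py s i open_ch close_ch) := by unfold Pre_balanced_block_py; infer_instance
def pvWitness_balanced_block_py : String × Int × String × String := ("(a'b)c", 0, "(", ")")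

def Spec_balanced_block_py (s : String) (i : Int) (open_ch : String) (close_ch : String) (out : Option String × Int) : Prop := out = balanced_block_py_alt s i open_ch close_ch
instance (s : String) (i : Int) (open_ch : String) (close_ch : String) (out : Option String × Int) : Decidable (Spec_balanced_block_py s i open_ch close_ch out) := by unfold Spec_balanced_block_py; infer_instance

-- ===== CLAIM (what is proved, stated in full; the proofs are below) =====
def Claim_equal_balanced_block_py : Prop := ∀ (s : String) (i : Int) (open_ch : String) (close_ch : String), Dom_balanced_block_py s i open_ch close_ch → Pre_balanced_block_py s i open_ch close_ch → Spec_balanced_block_py s i open_ch close_ch (balanced_block_py s i open_ch close_ch)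

-- ===== LEMMAS AND PROOFS =====

-- A's loop exits immediately once depth = 0.
lemma pvALoop_depth_zero (cs : List Char) (n : Int) (o c : String) (fuel : Nat) (j : Int)
    (in_str : Bool) (sq : Option String) (esc : Bool) :
    pvALoop cs n o c fuel j 0 in_str sq esc = (j, 0) := by
  cases fuel with
  | zero => rfl
  | succ k => simp [pvALoop]

-- Outside a string (esc = false), A's loop result does not depend on the stale str_q.
lemma pvALoop_sq_irrel (cs : List Char) (n : Int) (o c : String) :
    ∀ (fuel : Nat) (j d : Int) (sq1 sq2 : Option String),
      pvALoop cs n o c fuel j d false sq1 false = pvALoop cs n o c fuel j d false sq2 false := by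
  intro fuel
  induction fuel with
  | zero => intro j d sq1 sq2; rfl
  | succ k ih =>
    intro j d sq1 sq2
    simp only [pvALoop]
    split
    · rcases h : PySem.List.pyGet? cs j with _ | c0
      · rfl
      · simp only [Bool.false_eq_true, if_false]
        split
        · rfl
        · split
          · exact ih _ _ _ _
          · split
            · exact ih _ _ _ _
            · exact ih _ _ _ _
    · rfl

lemma pvBSkip_stop (cs : List Char) (n : Int) (q : String) (fuel : Nat) (j : Int)
    (h : ¬ j < n) : pvBSkip cs n q fuel j = none := by
  cases fuel with
  | zero => rfl
  | succ k => simp [pvBSkip, h]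

lemma pvBScan_stop (cs : List Char) (n : Int) (o c : String) (fuel : Nat) (j : Int)
    (h : ¬ j < n) : pvBScan cs n o c fuel j = none := by
  cases fuel with
  | zero => rfl
  | succ k => simp [pvBScan, h]

-- One unfolding step of A's loop, outside a string.
lemma pvALoop_step_out (cs : List Char) (n : Int) (o c : String) (j d : Int) (sq : Option String)
    (c0 : Char) (hj : j < n) (hd : 0 < d) (hc : PySem.List.pyGet? cs j = some c0) :
    pvALoop cs n o c (n - j).toNat j d false sq false =
      (if String.ofList [c0] = "\"" ∨ String.ofList [c0] = "'" then
        pvALoop cs n o c (n - (j+1)).toNat (j+1) d true (some (String.ofList [c0])) false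
      else if String.ofList [c0] = o then
        pvALoop cs n o c (n - (j+1)).toNat (j+1) (d+1) false sq false
      else if String.ofList [c0] = c then
        pvALoop cs n o c (n - (j+1)).toNat (j+1) (d-1) false sq false
      else pvALoop cs n o c (n - (j+1)).toNat (j+1) d false sq false) := by
  have hk : (n - j).toNat = (n - (j+1)).toNat + 1 := by omega
  rw [hk]
  simp only [pvALoop, if_pos (And.intro hj hd), hc, Bool.false_eq_true, if_false]

-- One unfolding step of A's loop, inside a string, escape flag clear.
lemma pvALoop_step_in (cs : List Char) (n : Int) (o c : String) (j d : Int) (q : String)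
    (c0 : Char) (hj : j < n) (hd : 0 < d) (hc : PySem.List.pyGet? cs j = some c0) :
    pvALoop cs n o c (n - j).toNat j d true (some q) false =
      (if String.ofList [c0] = "\\" then
        pvALoop cs n o c (n - (j+1)).toNat (j+1) d true (some q) true
      else if String.ofList [c0] = q then
        pvALoop cs n o c (n - (j+1)).toNat (j+1) d false (some q) false
      else pvALoop cs n o c (n - (j+1)).toNat (j+1) d true (some q) false) := by
  have hk : (n - j).toNat = (n - (j+1)).toNat + 1 := by omega
  rw [hk]
  simp only [pvALoop, if_pos (And.intro hj hd), hc, Bool.false_eq_true, if_false,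
    Option.some.injEq, if_true]

-- One unfolding step of A's loop, inside a string, escape flag set.
lemma pvALoop_step_esc (cs : List Char) (n : Int) (o c : String) (j d : Int) (q : String)
    (c0 : Char) (hj : j < n) (hd : 0 < d) (hc : PySem.List.pyGet? cs j = some c0) :
    pvALoop cs n o c (n - j).toNat j d true (some q) true =
      pvALoop cs n o c (n - (j+1)).toNat (j+1) d true (some q) false := by
  have hk : (n - j).toNat = (n - (j+1)).toNat + 1 := by omega
  rw [hk]
  simp [pvALoop, if_pos (And.intro hj hd), hc]

-- Indices from i+1 on are in range while j < len (needs -len ≤ j, which Pre_ gives at the start).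
lemma pvGet_some (cs : List Char) (j : Int) (hlo : -(cs.length : Int) ≤ j)
    (hj : j < (cs.length : Int)) : ∃ c0, PySem.List.pyGet? cs j = some c0 := by
  rcases hc : PySem.List.pyGet? cs j with _ | c0
  · rw [PySem.List.pyGet?_eq_none_iff] at hc
    exact absurd (by unfold PySem.Raise.InRange; omega) hc
  · exact ⟨c0, rfl⟩

-- Main correspondence: B's string skipper and recursive scanner against A's flat loop with a
-- depth counter and in-string state.  fuelB bounds the number of characters left to read.
lemma pvMain (cs : List Char) (o c : String) :
    ∀ fuelB : Nat,
      (∀ (j d : Int) (q : String) (sq : Option String), 1 ≤ d → -(cs.length : Int) ≤ j →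
          ((cs.length : Int) - j).toNat ≤ fuelB →
        (∀ j', pvBSkip cs (cs.length : Int) q fuelB j = some j' → j + 1 ≤ j' ∧
            pvALoop cs (cs.length : Int) o c ((cs.length : Int) - j).toNat j d true (some q) false
              = pvALoop cs (cs.length : Int) o c ((cs.length : Int) - j').toNat j' d false sq false) ∧
        (pvBSkip cs (cs.length : Int) q fuelB j = none →
            (pvALoop cs (cs.length : Int) o c ((cs.length : Int) - j).toNat j d true (some q) false).2 = d))
      ∧
      (∀ (j d : Int) (sq : Option String), 1 ≤ d → -(cs.length : Int) ≤ j →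
          ((cs.length : Int) - j).toNat ≤ fuelB →
        (∀ j', pvBScan cs (cs.length : Int) o c fuelB j = some j' → j + 1 ≤ j' ∧
            pvALoop cs (cs.length : Int) o c ((cs.length : Int) - j).toNat j d false sq false
              = pvALoop cs (cs.length : Int) o c ((cs.length : Int) - j').toNat j' (d-1) false sq false) ∧
        (pvBScan cs (cs.length : Int) o c fuelB j = none →
            d ≤ (pvALoop cs (cs.length : Int) o c ((cs.length : Int) - j).toNat j d false sq false).2)) := by
  intro fuelB
  induction fuelB with
  | zero =>
    constructor
    · intro j d q sq hd hlo hf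
      have hj : ¬ j < (cs.length : Int) := by omega
      have h0 : ((cs.length : Int) - j).toNat = 0 := by omega
      refine ⟨fun j' hj' => ?_, fun _ => ?_⟩
      · rw [pvBSkip_stop cs _ q 0 j hj] at hj'; cases hj'
      · rw [h0]; rfl
    · intro j d sq hd hlo hf
      have hj : ¬ j < (cs.length : Int) := by omega
      have h0 : ((cs.length : Int) - j).toNat = 0 := by omega
      refine ⟨fun j' hj' => ?_, fun _ => ?_⟩
      · rw [pvBScan_stop cs _ o c 0 j hj] at hj'; cases hj'
      · rw [h0]; exact le_refl d
  | succ fuel ih =>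
    obtain ⟨ihSkip, ihScan⟩ := ih
    constructor
    · -- skip part
      intro j d q sq hd hlo hf
      by_cases hj : j < (cs.length : Int)
      · obtain ⟨c0, hc⟩ := pvGet_some cs j hlo hj
        have hd' : 0 < d := by omega
        by_cases hbs : String.ofList [c0] = "\\"
        · -- backslash: B skips two characters, A consumes one and sets esc
          have hB : pvBSkip cs (cs.length : Int) q (fuel+1) j
              = pvBSkip cs (cs.length : Int) q fuel (j+2) := by
            simp [pvBSkip, hj, hc, hbs]
          have hA1 := pvALoop_step_in cs (cs.length : Int) o c j d q c0 hj hd' hc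
          rw [if_pos hbs] at hA1
          by_cases hj1 : j + 1 < (cs.length : Int)
          · obtain ⟨c1, hc1⟩ := pvGet_some cs (j+1) (by omega) hj1
            have hA2 := pvALoop_step_esc cs (cs.length : Int) o c (j+1) d q c1 hj1 hd' hc1
            have hnorm : j + 1 + 1 = j + 2 := by ring
            rw [hnorm] at hA2
            have h := ihSkip (j+2) d q sq hd (by omega) (by omega)
            refine ⟨fun j' hj' => ?_, fun hnone => ?_⟩
            · rw [hB] at hj'
              obtain ⟨hle, heq⟩ := h.1 j' hj'
              exact ⟨by omega, by rw [hA1, hA2]; exact heq⟩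
            · rw [hB] at hnone
              rw [hA1, hA2]; exact h.2 hnone
          · have hB2 : pvBSkip cs (cs.length : Int) q fuel (j+2) = none :=
              pvBSkip_stop _ _ _ _ _ (by omega)
            have h0 : ((cs.length : Int) - (j+1)).toNat = 0 := by omega
            refine ⟨fun j' hj' => ?_, fun _ => ?_⟩
            · rw [hB, hB2] at hj'; cases hj'
            · rw [hA1, h0]; rfl
        · by_cases hq : String.ofList [c0] = q
          · -- closing quote
            have hbs' : ¬ q = "\\" := by rw [← hq]; exact hbs
            have hB : pvBSkip cs (cs.length : Int) q (fuel+1) j = some (j+1) := by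
              simp [pvBSkip, hj, hc, hbs', hq]
            have hA1 := pvALoop_step_in cs (cs.length : Int) o c j d q c0 hj hd' hc
            rw [if_neg hbs, if_pos hq] at hA1
            refine ⟨fun j' hj' => ?_, fun hnone => ?_⟩
            · rw [hB] at hj'
              obtain rfl : j + 1 = j' := Option.some.inj hj'
              refine ⟨le_refl _, ?_⟩
              rw [hA1]
              exact pvALoop_sq_irrel cs _ o c _ _ _ _ _
            · rw [hB] at hnone; cases hnone
          · -- ordinary character inside the string
            have hB : pvBSkip cs (cs.length : Int) q (fuel+1) j
                = pvBSkip cs (cs.length : Int) q fuel (j+1) := by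
              simp [pvBSkip, hj, hc, hbs, hq]
            have hA1 := pvALoop_step_in cs (cs.length : Int) o c j d q c0 hj hd' hc
            rw [if_neg hbs, if_neg hq] at hA1
            have h := ihSkip (j+1) d q sq hd (by omega) (by omega)
            refine ⟨fun j' hj' => ?_, fun hnone => ?_⟩
            · rw [hB] at hj'
              obtain ⟨hle, heq⟩ := h.1 j' hj'
              exact ⟨by omega, by rw [hA1]; exact heq⟩
            · rw [hB] at hnone
              rw [hA1]; exact h.2 hnone
      · have h0 : ((cs.length : Int) - j).toNat = 0 := by omega
        refine ⟨fun j' hj' => ?_, fun _ => ?_⟩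
        · rw [pvBSkip_stop cs _ q (fuel+1) j hj] at hj'; cases hj'
        · rw [h0]; rfl
    · -- scan part
      intro j d sq hd hlo hf
      by_cases hj : j < (cs.length : Int)
      · obtain ⟨c0, hc⟩ := pvGet_some cs j hlo hj
        have hd' : 0 < d := by omega
        have hA1 := pvALoop_step_out cs (cs.length : Int) o c j d sq c0 hj hd' hc
        by_cases hqt : String.ofList [c0] = "\"" ∨ String.ofList [c0] = "'"
        · -- opening quote: B calls the skipper, then continues scanning
          rw [if_pos hqt] at hA1
          have hsk := ihSkip (j+1) d (String.ofList [c0]) sq hd (by omega) (by omega)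
          rcases hskv : pvBSkip cs (cs.length : Int) (String.ofList [c0]) fuel (j+1) with _ | j''
          · have hB : pvBScan cs (cs.length : Int) o c (fuel+1) j = none := by
              rcases hqt with h1 | h1 <;>
                simp [pvBScan, hj, hc, h1, h1 ▸ hskv]
            refine ⟨fun j' hj' => ?_, fun _ => ?_⟩
            · rw [hB] at hj'; cases hj'
            · rw [hA1]; exact ge_of_eq (hsk.2 hskv)
          · have hB : pvBScan cs (cs.length : Int) o c (fuel+1) j
                = pvBScan cs (cs.length : Int) o c fuel j'' := by
              rcases hqt with h1 | h1 <;>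
                simp [pvBScan, hj, hc, h1, h1 ▸ hskv]
            obtain ⟨hle'', heq''⟩ := hsk.1 j'' hskv
            have hcont := ihScan j'' d sq hd (by omega) (by omega)
            refine ⟨fun j' hj' => ?_, fun hnone => ?_⟩
            · rw [hB] at hj'
              obtain ⟨hle, heq⟩ := hcont.1 j' hj'
              exact ⟨by omega, by rw [hA1, heq'']; exact heq⟩
            · rw [hB] at hnone
              rw [hA1, heq'']; exact hcont.2 hnone
        · by_cases ho : String.ofList [c0] = o
          · -- nested open: B recurses (the call stack), A increments the depth counter
            rw [if_neg hqt, if_pos ho] at hA1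
            have hqt2 : ¬(o = "\"" ∨ o = "'") := by rw [← ho]; exact hqt
            have hrec := ihScan (j+1) (d+1) sq (by omega) (by omega) (by omega)
            rcases hrv : pvBScan cs (cs.length : Int) o c fuel (j+1) with _ | j''
            · have hB : pvBScan cs (cs.length : Int) o c (fuel+1) j = none := by
                simp [pvBScan, hj, hc, hqt2, ho, hrv]
              refine ⟨fun j' hj' => ?_, fun _ => ?_⟩
              · rw [hB] at hj'; cases hj'
              · rw [hA1]
                exact le_trans (by omega) (hrec.2 hrv)
            · have hB : pvBScan cs (cs.length : Int) o c (fuel+1) j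
                  = pvBScan cs (cs.length : Int) o c fuel j'' := by
                simp [pvBScan, hj, hc, hqt2, ho, hrv]
              obtain ⟨hle'', heq''⟩ := hrec.1 j'' hrv
              have hd1 : d + 1 - 1 = d := by ring
              rw [hd1] at heq''
              have hcont := ihScan j'' d sq hd (by omega) (by omega)
              refine ⟨fun j' hj' => ?_, fun hnone => ?_⟩
              · rw [hB] at hj'
                obtain ⟨hle, heq⟩ := hcont.1 j' hj'
                exact ⟨by omega, by rw [hA1, heq'']; exact heq⟩
              · rw [hB] at hnone
                rw [hA1, heq'']; exact hcont.2 hnone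
          · by_cases hcl : String.ofList [c0] = c
            · -- matching close: B returns j+1, A decrements the depth to d-1
              rw [if_neg hqt, if_neg ho, if_pos hcl] at hA1
              have hqt2 : ¬(c = "\"" ∨ c = "'") := by rw [← hcl]; exact hqt
              have ho2 : ¬ c = o := by rw [← hcl]; exact ho
              have hB : pvBScan cs (cs.length : Int) o c (fuel+1) j = some (j+1) := by
                simp [pvBScan, hj, hc, hqt2, ho2, hcl]
              refine ⟨fun j' hj' => ?_, fun hnone => ?_⟩
              · rw [hB] at hj'
                obtain rfl : j + 1 = j' := Option.some.inj hj'
                exact ⟨le_refl _, hA1⟩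
              · rw [hB] at hnone; cases hnone
            · -- ordinary character
              rw [if_neg hqt, if_neg ho, if_neg hcl] at hA1
              have hB : pvBScan cs (cs.length : Int) o c (fuel+1) j
                  = pvBScan cs (cs.length : Int) o c fuel (j+1) := by
                simp [pvBScan, hj, hc, hqt, ho, hcl]
              have h := ihScan (j+1) d sq hd (by omega) (by omega)
              refine ⟨fun j' hj' => ?_, fun hnone => ?_⟩
              · rw [hB] at hj'
                obtain ⟨hle, heq⟩ := h.1 j' hj'
                exact ⟨by omega, by rw [hA1]; exact heq⟩
              · rw [hB] at hnone
                rw [hA1]; exact h.2 hnone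
      · have h0 : ((cs.length : Int) - j).toNat = 0 := by omega
        refine ⟨fun j' hj' => ?_, fun _ => ?_⟩
        · rw [pvBScan_stop cs _ o c (fuel+1) j hj] at hj'; cases hj'
        · rw [h0]; exact le_refl d

-- ===== VERDICT (by name: the statement is the Claim_ definition above) =====
theorem balanced_block_py_spec : Claim_equal_balanced_block_py := by
  intro s i o c _ hpre
  unfold Spec_balanced_block_py balanced_block_py balanced_block_py_alt
  simp only []
  by_cases hni : ((s.toList.length : Int)) ≤ i
  · rw [if_pos hni, if_pos hni]
  · rw [if_neg hni, if_neg hni]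
    have hlo : -(s.toList.length : Int) ≤ i := by
      rcases hpre with h | h
      · exact h
      · exact absurd h hni
    obtain ⟨c0, hc⟩ := pvGet_some s.toList i hlo (by omega)
    simp only [hc]
    by_cases hop : String.ofList [c0] ≠ o
    · rw [if_pos hop, if_pos hop]
    · rw [if_neg hop, if_neg hop]
      have h := (pvMain s.toList o c ((s.toList.length : Int) - (i+1)).toNat).2
        (i+1) 1 none (le_refl 1) (by omega) (le_refl _)
      rcases hsc : pvBScan s.toList (s.toList.length : Int) o c
          ((s.toList.length : Int) - (i+1)).toNat (i+1) with _ | e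
      · -- unbalanced: A's depth stays ≥ 1, both sides fail
        have h2 := h.2 hsc
        rw [if_neg (by omega)]
      · obtain ⟨_, heq⟩ := h.1 e hsc
        rw [show (1 : Int) - 1 = 0 from rfl, pvALoop_depth_zero] at heq
        rw [heq]
        simp
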